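-- pv_equiv track=rewrite | github.com/rf-iasys/OEIS | OEIS_A002378.py | A002378
-- ===== SOURCE A (Python) =====
-- def A002378(n):
--     marked = []
--     current = 1
--     k = 0
--
--     while len(marked) < n:
--         k += current - 1
--         current += 2
--         marked.append(k)
--
--     return marked
-- ===== SOURCE B (Python) =====
-- def A002378(n):
--     marked = []
--     i = 0
--     while len(marked) < n:
--         marked.append(i * (i + 1))
--         i += 1
--     return marked
-- ===== Notes on version B (the rewrite author's own statement) =====
-- stated objective: simpler
-- what changed: Replaces A's running accumulator (k plus the odd-step counter current) with a single index i and the closed-form oblong term i*(i+1) appended directly each iteration.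
import Mathlib
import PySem

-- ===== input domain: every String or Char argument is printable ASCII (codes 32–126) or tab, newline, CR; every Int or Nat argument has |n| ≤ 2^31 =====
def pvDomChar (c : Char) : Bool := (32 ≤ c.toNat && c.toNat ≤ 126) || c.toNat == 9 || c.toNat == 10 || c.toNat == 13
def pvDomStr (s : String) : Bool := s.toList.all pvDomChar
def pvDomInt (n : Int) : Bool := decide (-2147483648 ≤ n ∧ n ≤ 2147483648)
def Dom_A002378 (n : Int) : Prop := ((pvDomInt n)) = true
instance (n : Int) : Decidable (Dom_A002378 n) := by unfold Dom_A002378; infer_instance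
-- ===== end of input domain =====

-- B replaces A's running accumulator (k and the odd-step `current`) with a single index i
-- and the closed-form oblong term i*(i+1); simpler state, same values.

-- ===== PORT A =====
-- the while loop: fuel = remaining iterations (len(marked) < n ⇒ exactly n.toNat iterations)
def A002378_loop : Nat → Int → Int → List Int → List Int
  | 0, _, _, marked => marked
  | fuel + 1, current, k, marked =>
    let k' := k + current - 1
    A002378_loop fuel (current + 2) k' (marked ++ [k'])

def A002378 (n : Int) : List Int := A002378_loop n.toNat 1 0 []

-- ===== PORT B =====
def A002378_alt_loop : Nat → Int → List Int
  | 0, _ => []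
  | fuel + 1, i => i * (i + 1) :: A002378_alt_loop fuel (i + 1)

def A002378_alt (n : Int) : List Int := A002378_alt_loop n.toNat 0

-- ===== PRECONDITION & SPEC =====
def Spec_A002378 (n : Int) (out : List Int) : Prop := out = A002378_alt n
instance (n : Int) (out : List Int) : Decidable (Spec_A002378 n out) := by unfold Spec_A002378; infer_instance

-- ===== CLAIM (what is proved, stated in full; the proofs are below) =====
def Claim_equal_A002378 : Prop := ∀ (n : Int), Dom_A002378 n → Spec_A002378 n (A002378 n)

-- ===== LEMMAS AND PROOFS =====
theorem A002378_loop_inv (fuel : Nat) :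
    ∀ (i : Int) (acc : List Int),
      A002378_loop fuel (2 * i + 1) ((i - 1) * i) acc = acc ++ A002378_alt_loop fuel i := by
  induction fuel with
  | zero => intro i acc; simp [A002378_loop, A002378_alt_loop]
  | succ m ih =>
    intro i acc
    have h1 : (i - 1) * i + (2 * i + 1) - 1 = i * (i + 1) := by ring
    have h2 : (2 * i + 1) + 2 = 2 * (i + 1) + 1 := by ring
    have h3 : i * (i + 1) = ((i + 1) - 1) * (i + 1) := by ring
    simp only [A002378_loop, A002378_alt_loop, h1, h2]
    rw [h3, ih (i + 1)]
    simp

-- ===== VERDICT (by name: the statement is the Claim_ definition above) =====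
theorem A002378_spec : Claim_equal_A002378 := by
  intro n _
  unfold Spec_A002378 A002378 A002378_alt
  have := A002378_loop_inv n.toNat 0 []
  simpa using this
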